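-- pv_equiv track=rewrite | github.com/GiangHuynh16/ViSemPar_new1 | src/postprocessor.py | format_graph
-- ===== SOURCE A (Python) =====
-- def format_graph(amr_string: str, indent: int = 4) -> str:
--     """
--     Format linearized AMR into indented graph structure
--     Makes it human-readable and matches VLSP format
--     """
--     lines = []
--     current_indent = 0
--     current_line = ""
--
--     i = 0
--     while i < len(amr_string):
--         char = amr_string[i]
--
--         if char == '(':
--             # Start new nested structure
--             if current_line.strip():
--                 lines.append(' ' * (current_indent * indent) + current_line.strip())
--                 current_line = ""
--             current_line += char
--             current_indent += 1
--
--         elif char == ')':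
--             # Close nested structure
--             if current_line.strip():
--                 lines.append(' ' * ((current_indent - 1) * indent) + current_line.strip())
--                 current_line = ""
--             current_indent -= 1
--             lines.append(' ' * (current_indent * indent) + char)
--
--         elif char == ':':
--             # New relation - new line
--             if current_line.strip() and not current_line.strip().endswith('('):
--                 lines.append(' ' * (current_indent * indent) + current_line.strip())
--                 current_line = ""
--             # Look ahead to get full relation
--             j = i + 1
--             while j < len(amr_string) and amr_string[j] not in ' \t\n()':
--                 j += 1
--             relation = amr_string[i:j]
--             current_line = relation
--             i = j - 1
--
--         else:
--             current_line += char
--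
--         i += 1
--
--     # Add any remaining line
--     if current_line.strip():
--         lines.append(' ' * (current_indent * indent) + current_line.strip())
--
--     # Clean up
--     formatted = '\n'.join(line.rstrip() for line in lines if line.strip())
--     return formatted
-- ===== SOURCE B (Python) =====
-- def format_graph(amr_string: str, indent: int = 4) -> str:
--     """Two-phase reimplementation: tokenize once into ( / ) / :relation / text
--     tokens, then fold the tokens into (level, text) pairs and render at the end
--     (no final filter/rstrip pass is needed: every emitted text is stripped and
--     non-empty)."""
--     # Phase 1: tokenize
--     toks = []
--     i, n = 0, len(amr_string)
--     while i < n: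
--         c = amr_string[i]
--         if c == '(':
--             toks.append(('open', ''))
--             i += 1
--         elif c == ')':
--             toks.append(('close', ''))
--             i += 1
--         elif c == ':':
--             j = i + 1
--             while j < n and amr_string[j] not in ' \t\n()':
--                 j += 1
--             toks.append(('rel', amr_string[i:j]))
--             i = j
--         else:
--             j = i + 1
--             while j < n and amr_string[j] not in '():':
--                 j += 1
--             toks.append(('text', amr_string[i:j]))
--             i = j
--
--     # Phase 2: fold tokens into (level, content) pairs
--     out = []
--     level = 0
--     pend = ""
--     for kind, s in toks:
--         if kind == 'open':
--             t = pend.strip()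
--             if t:
--                 out.append((level, t))
--                 pend = ""
--             pend += '('
--             level += 1
--         elif kind == 'close':
--             t = pend.strip()
--             if t:
--                 out.append((level - 1, t))
--                 pend = ""
--             level -= 1
--             out.append((level, ')'))
--         elif kind == 'rel':
--             t = pend.strip()
--             if t and not t.endswith('('):
--                 out.append((level, t))
--             pend = s
--         else:
--             pend += s
--     t = pend.strip()
--     if t:
--         out.append((level, t))
--
--     # Phase 3: render
--     return '\n'.join(' ' * (lvl * indent) + txt for lvl, txt in out)
-- ===== Notes on version B (the rewrite author's own statement) =====
-- stated objective: faster
-- what changed: A's single char-by-char while-loop with index look-ahead is re-decomposed into three phases: a one-pass tokenizer producing (/)/:relation/text-chunk tokens, a fold over the tokens building (indent-level, stripped-content) pairs, and a final render that pads each pair; text runs are consumed as whole chunks instead of one character (with a strip-check per structural character on an ever-growing line) at a time, and A's closing filter/rstrip cleanup pass is dropped because every emitted content is provably non-empty and stripped.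
import Mathlib
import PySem

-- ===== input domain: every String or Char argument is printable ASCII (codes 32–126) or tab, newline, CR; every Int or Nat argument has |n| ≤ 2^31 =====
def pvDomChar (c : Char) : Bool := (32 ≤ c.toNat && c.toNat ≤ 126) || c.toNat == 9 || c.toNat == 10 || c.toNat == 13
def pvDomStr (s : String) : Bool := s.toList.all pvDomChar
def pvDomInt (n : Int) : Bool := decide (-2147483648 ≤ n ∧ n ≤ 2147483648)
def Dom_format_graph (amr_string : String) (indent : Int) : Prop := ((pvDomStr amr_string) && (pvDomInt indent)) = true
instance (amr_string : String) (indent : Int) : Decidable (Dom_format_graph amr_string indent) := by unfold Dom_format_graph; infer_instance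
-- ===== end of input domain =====

-- B re-decomposes A's single char-by-char loop into tokenize / fold / render phases,
-- consuming text chunks wholesale and dropping the final cleanup pass (measured faster
-- in a timing run); return values proved equal on the whole domain.

-- ===== PORT A =====
-- char not in ' \t\n()'  (the look-ahead loop of the ':' branch)
def fgNotSep (c : Char) : Bool := !(c == ' ' || c == '\t' || c == '\n' || c == '(' || c == ')')

-- the flush 'lines.append(SPACES + line.strip())'
def fgFlush (indent : Int) (lines : List (List Char)) (ind : Int) (line : List Char) : List (List Char) :=
  lines ++ [List.replicate ((ind * indent).toNat) ' ' ++ PySem.Chars.strip line]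

-- the while-loop of A: state (lines, current_indent, current_line); each branch
-- conditionally flushes; the inner while-j look-ahead is the takeWhile/dropWhile pair
def fgLoopA (indent : Int) (cs : List Char) (lines : List (List Char)) (ind : Int)
    (line : List Char) : List (List Char) × Int × List Char :=
  match cs with
  | [] => (lines, ind, line)
  | c :: rest =>
    if c = '(' then
      if PySem.Chars.strip line ≠ [] then
        fgLoopA indent rest (fgFlush indent lines ind line) (ind + 1) ['(']
      else
        fgLoopA indent rest lines (ind + 1) (line ++ ['('])
    else if c = ')' then
      if PySem.Chars.strip line ≠ [] then
        fgLoopA indent rest (fgFlush indent lines (ind - 1) line ++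
          [List.replicate (((ind - 1) * indent).toNat) ' ' ++ [')']]) (ind - 1) []
      else
        fgLoopA indent rest (lines ++ [List.replicate (((ind - 1) * indent).toNat) ' ' ++ [')']]) (ind - 1) line
    else if c = ':' then
      if PySem.Chars.strip line ≠ [] ∧ ¬ PySem.Chars.endswith (PySem.Chars.strip line) ['('] = true then
        fgLoopA indent (rest.dropWhile fgNotSep) (fgFlush indent lines ind line) ind (c :: rest.takeWhile fgNotSep)
      else
        fgLoopA indent (rest.dropWhile fgNotSep) lines ind (c :: rest.takeWhile fgNotSep)
    else
      fgLoopA indent rest lines ind (line ++ [c])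
termination_by cs.length
decreasing_by
  · simp
  · simp
  · simp
  · simp
  · exact Nat.lt_succ_of_le (List.length_dropWhile_le _ _)
  · exact Nat.lt_succ_of_le (List.length_dropWhile_le _ _)
  · simp

-- the final 'if current_line.strip(): lines.append(...)' after the loop
def fgPost (indent : Int) (st : List (List Char) × Int × List Char) : List (List Char) :=
  if PySem.Chars.strip st.2.2 ≠ [] then fgFlush indent st.1 st.2.1 st.2.2 else st.1

def format_graph (amr_string : String) (indent : Int) : String :=
  String.ofList (PySem.Chars.join ['\n']
    (((fgPost indent (fgLoopA indent amr_string.toList [] 0 [])).filter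
        (fun l => !(PySem.Chars.strip l).isEmpty)).map PySem.Chars.rstrip))

-- ===== PORT B =====
-- char not in '():'  (maximal verbatim text run)
def fgNotSpec (c : Char) : Bool := !(c == '(' || c == ')' || c == ':')

inductive FgTok where
  | open_
  | close
  | rel (s : List Char)
  | text (s : List Char)

-- Phase 1: one scan into tokens
def fgTokenize (cs : List Char) : List FgTok :=
  match cs with
  | [] => []
  | c :: rest =>
    if c = '(' then .open_ :: fgTokenize rest
    else if c = ')' then .close :: fgTokenize rest
    else if c = ':' then .rel (c :: rest.takeWhile fgNotSep) :: fgTokenize (rest.dropWhile fgNotSep)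
    else .text (c :: rest.takeWhile fgNotSpec) :: fgTokenize (rest.dropWhile fgNotSpec)
termination_by cs.length
decreasing_by
  · simp
  · simp
  · exact Nat.lt_succ_of_le (List.length_dropWhile_le _ _)
  · exact Nat.lt_succ_of_le (List.length_dropWhile_le _ _)

-- Phase 2: fold the tokens into (level, content) pairs (final flush folded in)
def fgProcess (toks : List FgTok) (out : List (Int × List Char)) (level : Int)
    (pend : List Char) : List (Int × List Char) :=
  match toks with
  | [] =>
    if PySem.Chars.strip pend ≠ [] then out ++ [(level, PySem.Chars.strip pend)] else out
  | .open_ :: r =>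
    if PySem.Chars.strip pend ≠ [] then
      fgProcess r (out ++ [(level, PySem.Chars.strip pend)]) (level + 1) ['(']
    else
      fgProcess r out (level + 1) (pend ++ ['('])
  | .close :: r =>
    if PySem.Chars.strip pend ≠ [] then
      fgProcess r (out ++ [(level - 1, PySem.Chars.strip pend), (level - 1, [')'])]) (level - 1) []
    else
      fgProcess r (out ++ [(level - 1, [')'])]) (level - 1) pend
  | .rel s :: r =>
    if PySem.Chars.strip pend ≠ [] ∧ ¬ PySem.Chars.endswith (PySem.Chars.strip pend) ['('] = true then
      fgProcess r (out ++ [(level, PySem.Chars.strip pend)]) level s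
    else
      fgProcess r out level s
  | .text s :: r => fgProcess r out level (pend ++ s)

-- Phase 3: render each pair; no cleanup pass
def fgRender (indent : Int) (p : Int × List Char) : List Char :=
  List.replicate ((p.1 * indent).toNat) ' ' ++ p.2

def format_graph_alt (amr_string : String) (indent : Int) : String :=
  String.ofList (PySem.Chars.join ['\n']
    ((fgProcess (fgTokenize amr_string.toList) [] 0 []).map (fgRender indent)))

-- ===== PRECONDITION & SPEC =====
def Spec_format_graph (amr_string : String) (indent : Int) (out : String) : Prop := out = format_graph_alt amr_string indent
instance (amr_string : String) (indent : Int) (out : String) : Decidable (Spec_format_graph amr_string indent out) := by unfold Spec_format_graph; infer_instance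

-- ===== CLAIM (what is proved, stated in full; the proofs are below) =====
def Claim_equal_format_graph : Prop := ∀ (amr_string : String) (indent : Int), Dom_format_graph amr_string indent → Spec_format_graph amr_string indent (format_graph amr_string indent)

-- ===== LEMMAS AND PROOFS =====

-- a chunk of non-special chars is consumed by A one char at a time into current_line
theorem fg_textStep (indent : Int) (chunk : List Char) (hc : ∀ x ∈ chunk, fgNotSpec x = true) :
    ∀ (rest : List Char) (lines : List (List Char)) (ind : Int) (pend : List Char),
    fgLoopA indent (chunk ++ rest) lines ind pend = fgLoopA indent rest lines ind (pend ++ chunk) := by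
  induction chunk with
  | nil => intro rest lines ind pend; simp
  | cons x xs ih =>
    intro rest lines ind pend
    have hx : fgNotSpec x = true := hc x (by simp)
    have h1 : ¬ x = '(' := by rintro rfl; simp [fgNotSpec] at hx
    have h2 : ¬ x = ')' := by rintro rfl; simp [fgNotSpec] at hx
    have h3 : ¬ x = ':' := by rintro rfl; simp [fgNotSpec] at hx
    rw [List.cons_append, fgLoopA, if_neg h1, if_neg h2, if_neg h3,
        ih (fun y hy => hc y (by simp [hy]))]
    simp

theorem fg_main (indent : Int) : ∀ (n : Nat) (cs : List Char), cs.length ≤ n →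
    ∀ (out : List (Int × List Char)) (ind : Int) (pend : List Char),
    fgPost indent (fgLoopA indent cs (out.map (fgRender indent)) ind pend)
    = (fgProcess (fgTokenize cs) out ind pend).map (fgRender indent) := by
  intro n
  induction n with
  | zero =>
    intro cs hlen out ind pend
    have : cs = [] := by cases cs <;> simp_all
    subst this
    rw [fgLoopA, fgTokenize]
    simp only [fgProcess, fgPost]
    split_ifs with h <;> simp [fgFlush, fgRender]
  | succ n ih =>
    intro cs hlen out ind pend
    match cs with
    | [] =>
      rw [fgLoopA, fgTokenize]
      simp only [fgProcess, fgPost]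
      split_ifs with h <;> simp [fgFlush, fgRender]
    | c :: rest =>
      by_cases h1 : c = '('
      · subst h1
        rw [fgLoopA, if_pos rfl, fgTokenize, if_pos rfl]
        simp only [fgProcess]
        split_ifs with h
        · have := ih rest (by simpa using hlen) (out ++ [(ind, PySem.Chars.strip pend)]) (ind + 1) ['(']
          simpa [fgFlush, fgRender] using this
        · exact ih rest (by simpa using hlen) out (ind + 1) (pend ++ ['('])
      · by_cases h2 : c = ')'
        · subst h2
          rw [fgLoopA, if_neg (show ¬((')':Char) = '(') by decide), if_pos rfl,
              fgTokenize, if_neg (show ¬((')':Char) = '(') by decide), if_pos rfl]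
          simp only [fgProcess]
          split_ifs with h
          · have := ih rest (by simpa using hlen)
              (out ++ [(ind - 1, PySem.Chars.strip pend), (ind - 1, [')'])]) (ind - 1) []
            simpa [fgFlush, fgRender] using this
          · have := ih rest (by simpa using hlen) (out ++ [(ind - 1, [')'])]) (ind - 1) pend
            simpa [fgFlush, fgRender] using this
        · by_cases h3 : c = ':'
          · subst h3
            rw [fgLoopA, if_neg (show ¬((':':Char) = '(') by decide), if_neg (show ¬((':':Char) = ')') by decide), if_pos rfl,
                fgTokenize, if_neg (show ¬((':':Char) = '(') by decide), if_neg (show ¬((':':Char) = ')') by decide), if_pos rfl]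
            simp only [fgProcess]
            have hlen' : (rest.dropWhile fgNotSep).length ≤ n :=
              le_trans (List.length_dropWhile_le _ _) (by simpa using hlen)
            split_ifs with h
            · have := ih _ hlen' (out ++ [(ind, PySem.Chars.strip pend)]) ind
                (':' :: rest.takeWhile fgNotSep)
              simpa [fgFlush, fgRender] using this
            · exact ih _ hlen' out ind (':' :: rest.takeWhile fgNotSep)
          · -- text chunk
            have hx : fgNotSpec c = true := by
              simp [fgNotSpec, h1, h2, h3]
            have hsplit : c :: rest = (c :: rest.takeWhile fgNotSpec) ++ rest.dropWhile fgNotSpec := by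
              simp [List.takeWhile_append_dropWhile]
            rw [fgTokenize, if_neg h1, if_neg h2, if_neg h3]
            simp only [fgProcess]
            conv_lhs => rw [hsplit]
            rw [fg_textStep indent (c :: rest.takeWhile fgNotSpec)
                (by intro x hx'; rcases List.mem_cons.mp hx' with rfl | hm
                    · exact hx
                    · exact List.mem_takeWhile_imp hm)]
            have hlen' : (rest.dropWhile fgNotSpec).length ≤ n :=
              le_trans (List.length_dropWhile_le _ _) (by simpa using hlen)
            exact ih _ hlen' out ind (pend ++ (c :: rest.takeWhile fgNotSpec))

-- every content B ever emits: stripped and non-empty (so A\'s cleanup is the identity on it)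
def fgGood (t : List Char) : Prop := t ≠ [] ∧ PySem.Chars.strip t = t

theorem fg_dw_head {p : Char → Bool} {c : Char} {cs : List Char}
    (h : List.dropWhile p (c :: cs) = c :: cs) : p c = false := by
  by_cases hc : p c = true
  · rw [List.dropWhile_cons_of_pos hc] at h
    have hl := List.length_dropWhile_le p cs
    rw [h] at hl
    simp at hl
  · simpa using hc

theorem fg_lstrip_eq_of_strip_eq {t : List Char} (h : PySem.Chars.strip t = t) :
    PySem.Chars.lstrip t = t := by
  have hsuf : PySem.Chars.lstrip t <:+ t := List.dropWhile_suffix _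
  refine hsuf.eq_of_length ?_
  have h1 : (PySem.Chars.lstrip t).length ≤ t.length := hsuf.length_le
  have h2 : t.length ≤ (PySem.Chars.lstrip t).length := by
    conv_lhs => rw [← h]
    unfold PySem.Chars.strip PySem.Chars.rstrip
    simpa using List.length_dropWhile_le PySem.Chars.isspace (PySem.Chars.lstrip t).reverse
  omega

theorem fg_rstrip_eq_of_strip_eq {t : List Char} (h : PySem.Chars.strip t = t) :
    PySem.Chars.rstrip t = t := by
  have := fg_lstrip_eq_of_strip_eq h
  unfold PySem.Chars.strip at h
  rw [this] at h
  exact h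

theorem fg_strip_strip (t : List Char) :
    PySem.Chars.strip (PySem.Chars.strip t) = PySem.Chars.strip t := by
  have hz : PySem.Chars.lstrip (PySem.Chars.lstrip t) = PySem.Chars.lstrip t :=
    List.dropWhile_idempotent _ _
  set z := PySem.Chars.lstrip t with hzdef
  have hr : PySem.Chars.rstrip (PySem.Chars.rstrip z) = PySem.Chars.rstrip z := by
    unfold PySem.Chars.rstrip
    rw [List.reverse_reverse, List.dropWhile_idempotent]
  have hpre : PySem.Chars.rstrip z <+: z := by
    unfold PySem.Chars.rstrip
    have := List.dropWhile_suffix (l := z.reverse) PySem.Chars.isspace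
    simpa using List.reverse_prefix.mpr this
  have hl : PySem.Chars.lstrip (PySem.Chars.rstrip z) = PySem.Chars.rstrip z := by
    cases hy : PySem.Chars.rstrip z with
    | nil => simp [PySem.Chars.lstrip]
    | cons c cs =>
      obtain ⟨w, hw⟩ := hpre
      rw [hy] at hw
      have hzc : z = c :: (cs ++ w) := by rw [← hw]; simp
      have hc : PySem.Chars.isspace c = false := by
        apply fg_dw_head (p := PySem.Chars.isspace) (cs := cs ++ w)
        rw [← hzc]
        exact hz
      unfold PySem.Chars.lstrip
      rw [List.dropWhile_cons_of_neg (by simp [hc])]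
  show PySem.Chars.strip (PySem.Chars.rstrip z) = PySem.Chars.rstrip z
  unfold PySem.Chars.strip
  rw [hl, hr]

theorem fg_rstrip_rep_append {t : List Char} (k : Nat) (ht : t ≠ [])
    (h : PySem.Chars.rstrip t = t) :
    PySem.Chars.rstrip (List.replicate k ' ' ++ t) = List.replicate k ' ' ++ t := by
  obtain ⟨c, cs, hrev⟩ : ∃ c cs, t.reverse = c :: cs := by
    cases hr : t.reverse with
    | nil => exact absurd (by simpa using congrArg List.reverse hr) ht
    | cons c cs => exact ⟨c, cs, rfl⟩
  have hd : List.dropWhile PySem.Chars.isspace t.reverse = t.reverse := by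
    unfold PySem.Chars.rstrip at h
    exact List.reverse_inj.mp (by simpa using h)
  have hc : PySem.Chars.isspace c = false := fg_dw_head (by rw [← hrev]; exact hd)
  unfold PySem.Chars.rstrip
  rw [List.reverse_append, hrev, List.cons_append]
  have hstep : List.dropWhile PySem.Chars.isspace (c :: (cs ++ (List.replicate k ' ').reverse))
      = c :: (cs ++ (List.replicate k ' ').reverse) := List.dropWhile_cons_of_neg (by simp [hc])
  rw [hstep, ← List.cons_append, ← hrev]
  simp

theorem fg_lstrip_rep_append (k : Nat) (t : List Char) :
    PySem.Chars.lstrip (List.replicate k ' ' ++ t) = PySem.Chars.lstrip t := by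
  induction k with
  | zero => simp
  | succ n ih =>
    unfold PySem.Chars.lstrip at *
    rw [List.replicate_succ, List.cons_append, List.dropWhile_cons_of_pos (by decide), ih]

theorem fg_inv : ∀ (toks : List FgTok) (out : List (Int × List Char)) (level : Int) (pend : List Char),
    (∀ p ∈ out, fgGood p.2) → ∀ p ∈ fgProcess toks out level pend, fgGood p.2 := by
  intro toks
  induction toks with
  | nil =>
    intro out level pend hout p hp
    simp only [fgProcess] at hp
    split_ifs at hp with h
    · rcases List.mem_append.mp hp with hm | hm
      · exact hout p hm
      · rw [List.mem_singleton.mp hm]; exact ⟨h, fg_strip_strip pend⟩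
    · exact hout p hp
  | cons tok r ih =>
    intro out level pend hout p hp
    match tok with
    | .open_ =>
      simp only [fgProcess] at hp
      split_ifs at hp with h
      · refine ih _ _ _ ?_ p hp
        intro q hq
        rcases List.mem_append.mp hq with hm | hm
        · exact hout q hm
        · rw [List.mem_singleton.mp hm]; exact ⟨h, fg_strip_strip pend⟩
      · exact ih _ _ _ hout p hp
    | .close =>
      simp only [fgProcess] at hp
      split_ifs at hp with h
      · refine ih _ _ _ ?_ p hp
        intro q hq
        rcases List.mem_append.mp hq with hm | hm
        · exact hout q hm
        · rcases List.mem_cons.mp hm with rfl | hm'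
          · exact ⟨h, fg_strip_strip pend⟩
          · rw [List.mem_singleton.mp hm']; exact show fgGood [')'] from ⟨by decide, by decide⟩
      · refine ih _ _ _ ?_ p hp
        intro q hq
        rcases List.mem_append.mp hq with hm | hm
        · exact hout q hm
        · rw [List.mem_singleton.mp hm]; exact show fgGood [')'] from ⟨by decide, by decide⟩
    | .rel s =>
      simp only [fgProcess] at hp
      split_ifs at hp with h
      · refine ih _ _ _ ?_ p hp
        intro q hq
        rcases List.mem_append.mp hq with hm | hm
        · exact hout q hm
        · rw [List.mem_singleton.mp hm]; exact ⟨h.1, fg_strip_strip pend⟩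
      · exact ih _ _ _ hout p hp
    | .text s =>
      simp only [fgProcess] at hp
      exact ih _ _ _ hout p hp

theorem fg_cleanup (indent : Int) (out : List (Int × List Char)) (h : ∀ p ∈ out, fgGood p.2) :
    ((out.map (fgRender indent)).filter (fun l => !(PySem.Chars.strip l).isEmpty)).map PySem.Chars.rstrip
      = out.map (fgRender indent) := by
  induction out with
  | nil => simp
  | cons p ps ih =>
    obtain ⟨hne, hst⟩ := h p (by simp)
    have hls : PySem.Chars.lstrip p.2 = p.2 := fg_lstrip_eq_of_strip_eq hst
    have hrs : PySem.Chars.rstrip p.2 = p.2 := fg_rstrip_eq_of_strip_eq hst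
    have hstrip : PySem.Chars.strip (fgRender indent p) = p.2 := by
      unfold PySem.Chars.strip fgRender
      rw [fg_lstrip_rep_append, hls, hrs]
    have hrstrip : PySem.Chars.rstrip (fgRender indent p) = fgRender indent p :=
      fg_rstrip_rep_append _ hne hrs
    rw [List.map_cons, List.filter_cons_of_pos (by simp [hstrip, hne]), List.map_cons,
        hrstrip, ih (fun q hq => h q (by simp [hq]))]

-- ===== VERDICT (by name: the statement is the Claim_ definition above) =====
theorem format_graph_spec : Claim_equal_format_graph := by
  intro s indent _
  unfold Spec_format_graph format_graph format_graph_alt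
  have hm := fg_main indent s.toList.length s.toList le_rfl [] 0 []
  simp only [List.map_nil] at hm
  simp only [hm]
  congr 1
  congr 1
  exact fg_cleanup indent _ (fg_inv (fgTokenize s.toList) [] 0 [] (by simp))
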